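-- pv_equiv track=rewrite | github.com/miethe/CCDash | backend/services/codebase_explorer.py | _normalize_rel_path
-- ===== SOURCE A (Python) =====
-- def _normalize_rel_path(raw: str | None) -> str:
--     value = str(raw or "").replace("\\", "/").strip()
--     if not value:
--         return ""
--     value = value.lstrip("/")
--     if value.startswith("./"):
--         value = value[2:]
--     parts: list[str] = []
--     for token in value.split("/"):
--         clean = token.strip()
--         if not clean or clean == ".":
--             continue
--         if clean == "..":
--             raise ValueError("Path traversal is not allowed")
--         parts.append(clean)
--     return "/".join(parts)
-- ===== SOURCE B (Python) =====
-- def _normalize_rel_path(raw):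
--     text = str(raw or "").replace("\\", "/")
--     segs = []
--     cur = []
--     for ch in text + "/":
--         if ch == "/":
--             seg = "".join(cur).strip()
--             if seg == "..":
--                 raise ValueError("Path traversal is not allowed")
--             if seg and seg != ".":
--                 segs.append(seg)
--             cur = []
--         else:
--             cur.append(ch)
--     return "/".join(segs)
-- ===== Notes on version B (the rewrite author's own statement) =====
-- stated objective: alternative
-- what changed: B replaces A's preprocessing (strip/lstrip('/')/'./' prefix) plus split-based token loop with a single character-level scan: it walks text+'/' once, accumulating the current segment char by char and flushing it at each '/' (strip, reject '..', keep non-empty non-'.' segments), with no split, no lstrip and no prefix handling.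
import Mathlib
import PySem

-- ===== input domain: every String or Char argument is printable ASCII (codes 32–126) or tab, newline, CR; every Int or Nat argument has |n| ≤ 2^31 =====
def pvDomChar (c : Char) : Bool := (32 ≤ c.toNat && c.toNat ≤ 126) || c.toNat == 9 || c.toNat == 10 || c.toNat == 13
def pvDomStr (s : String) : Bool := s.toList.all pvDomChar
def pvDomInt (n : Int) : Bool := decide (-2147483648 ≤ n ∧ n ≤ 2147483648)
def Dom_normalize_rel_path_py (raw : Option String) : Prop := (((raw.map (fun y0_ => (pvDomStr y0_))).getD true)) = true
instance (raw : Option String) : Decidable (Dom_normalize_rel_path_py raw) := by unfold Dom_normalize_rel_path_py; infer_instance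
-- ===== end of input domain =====

-- B replaces A's preprocessing (strip / lstrip('/') / './' prefix) and split-based token loop by a
-- single character-level scan of text+'/' with a segment accumulator flushed at each '/'.
-- Pre_ excludes exactly the inputs on which Python A raises ValueError (a '/'-separated token strips
-- to '..'); B raises the same ValueError there.

-- ===== PORT A =====
-- the for-loop over value.split("/"): skip empty/'.' tokens, append others; a '..' token raises
-- ValueError in Python (unreachable under Pre_, here it just stops with the current parts)
def pvA_loop : List String → List String → List String
  | [], parts => parts
  | token :: ts, parts =>
      let clean := PySem.Str.strip token
      if clean = "" ∨ clean = "." then pvA_loop ts parts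
      else if clean = ".." then parts
      else pvA_loop ts (parts ++ [clean])

def normalize_rel_path_py (raw : Option String) : String :=
  let value := PySem.Str.strip (PySem.Str.replace (raw.getD "") "\\" "/")
  if value = "" then ""
  else
    -- value.lstrip("/"): ported by hand (PySem has no lstrip-with-charset); exact: drops leading '/'
    let value := String.ofList (value.toList.dropWhile (· == '/'))
    let value := if PySem.Str.startswith value "./" then PySem.Str.slice value (some 2) none else value
    let tokens := (PySem.Str.split? value "/").getD []
    PySem.Str.join "/" (pvA_loop tokens [])

-- ===== PORT B =====
-- the for-loop over text + "/": accumulate chars of the current segment in cur, flush at '/';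
-- a segment stripping to '..' raises ValueError in Python (unreachable under Pre_, here it stops)
def pvB_loop : List Char → List Char → List String → List String
  | [], _cur, segs => segs
  | c :: rest, cur, segs =>
      if c = '/' then
        let seg := PySem.Str.strip (String.ofList cur)   -- "".join(cur).strip()
        if seg = ".." then segs
        else if seg ≠ "" ∧ seg ≠ "." then pvB_loop rest [] (segs ++ [seg])
        else pvB_loop rest [] segs
      else pvB_loop rest (cur ++ [c]) segs

def normalize_rel_path_py_alt (raw : Option String) : String :=
  let text := PySem.Str.replace (raw.getD "") "\\" "/"
  PySem.Str.join "/" (pvB_loop (text.toList ++ ['/']) [] [])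

-- ===== PRECONDITION & SPEC =====
-- Pre_ excludes exactly the inputs on which A raises ValueError('Path traversal is not allowed'):
-- some '/'-separated token of the cleaned-up input strips to '..' (B raises the same error there).
def Pre_normalize_rel_path_py (raw : Option String) : Prop :=
  ".." ∉ ((PySem.Str.split? (PySem.Str.strip (PySem.Str.replace (raw.getD "") "\\" "/")) "/").getD []).map PySem.Str.strip
instance (raw : Option String) : Decidable (Pre_normalize_rel_path_py raw) := by unfold Pre_normalize_rel_path_py; infer_instance
def pvWitness_normalize_rel_path_py : Option String := some "  ./foo//bar / baz.txt "
def Spec_normalize_rel_path_py (raw : Option String) (out : String) : Prop := out = normalize_rel_path_py_alt raw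
instance (raw : Option String) (out : String) : Decidable (Spec_normalize_rel_path_py raw out) := by unfold Spec_normalize_rel_path_py; infer_instance

-- ===== CLAIM (what is proved, stated in full; the proofs are below) =====
def Claim_equal_normalize_rel_path_py : Prop := ∀ (raw : Option String), Dom_normalize_rel_path_py raw → Pre_normalize_rel_path_py raw → Spec_normalize_rel_path_py raw (normalize_rel_path_py raw)

-- ===== LEMMAS AND PROOFS =====

-- a simple structural model of PySem.Chars.splitOn on the one-character separator '/'
def pvSplit : List Char → List (List Char)
  | [] => [[]]
  | c :: rest => if c = '/' then [] :: pvSplit rest else (pvSplit rest).modifyHead (c :: ·)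

theorem pvSplit_ne_nil (l : List Char) : pvSplit l ≠ [] := by
  cases l with
  | nil => simp [pvSplit]
  | cons c rest =>
      simp only [pvSplit]
      split_ifs <;> simp [List.modifyHead]
      cases h : pvSplit rest with
      | nil => exact absurd h (pvSplit_ne_nil rest)
      | cons a as => simp

theorem pvSplit_go (fuel : Nat) (l cur : List Char) (acc : List (List Char))
    (h : l.length ≤ fuel) :
    PySem.Chars.splitOn.go ['/'] fuel l cur acc
      = acc.reverse ++ (pvSplit l).modifyHead (cur.reverse ++ ·) := by
  induction fuel generalizing l cur acc with
  | zero =>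
      have : l = [] := by cases l <;> simp_all
      subst this
      simp [PySem.Chars.splitOn.go, pvSplit, List.modifyHead]
  | succ f ih =>
      cases l with
      | nil => simp [PySem.Chars.splitOn.go, pvSplit, List.modifyHead]
      | cons c rest =>
          simp only [PySem.Chars.splitOn.go]
          by_cases hc : c = '/'
          · subst hc
            have hp : List.isPrefixOf ['/'] ('/' :: rest) = true := by
              simp [List.isPrefixOf]
            rw [if_pos hp]
            rw [ih _ _ _ (by simpa using Nat.le_of_succ_le_succ (by simpa using h))]
            simp [pvSplit, List.modifyHead]
            cases pvSplit rest <;> simp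
          · have hp : List.isPrefixOf ['/'] (c :: rest) = false := by
              simp [List.isPrefixOf]
              exact fun h' => absurd h'.symm hc
            rw [if_neg (by simp [hp])]
            rw [ih _ _ _ (by simpa using Nat.le_of_succ_le_succ (by simpa using h))]
            simp [pvSplit, hc, Function.comp_def]

theorem splitOn_eq_pvSplit (l : List Char) :
    PySem.Chars.splitOn l ['/'] = pvSplit l := by
  show PySem.Chars.splitOn.go ['/'] (l.length + 1) l [] [] = pvSplit l
  rw [pvSplit_go _ _ _ _ (Nat.le_succ _)]
  cases h : pvSplit l with
  | nil => exact absurd h (pvSplit_ne_nil l)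
  | cons a as => simp

-- stripped tokens of a list of chars
def pvToks (l : List Char) : List (List Char) := (pvSplit l).map PySem.Chars.strip
def pvGood (t : List Char) : Bool := !t.isEmpty && t ≠ ['.']

theorem pvToks_slash (xs : List Char) :
    pvToks ('/' :: xs) = [] :: pvToks xs := by
  have h : PySem.Chars.strip [] = [] := by decide
  simp [pvToks, pvSplit, h]

-- dropping leading '/' characters changes the token list only by removing leading empty tokens
theorem pvToks_dropWhile (l : List Char) :
    (pvToks (l.dropWhile (· == '/'))).filter pvGood = (pvToks l).filter pvGood ∧
    (∀ t, t ∈ pvToks (l.dropWhile (· == '/')) → t ∈ pvToks l) := by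
  induction l with
  | nil => exact ⟨rfl, fun t ht => ht⟩
  | cons c rest ih =>
      by_cases hc : c = '/'
      · subst hc
        simp only [List.dropWhile_cons, beq_self_eq_true, if_true]
        refine ⟨?_, fun t ht => ?_⟩
        · rw [ih.1, pvToks_slash]
          simp [List.filter, pvGood]
        · rw [pvToks_slash]
          exact List.mem_cons_of_mem _ (ih.2 t ht)
      · simp [hc]

theorem pvToks_dotslash (tail : List Char) :
    (pvToks ('.' :: '/' :: tail)).filter pvGood = (pvToks tail).filter pvGood ∧
    (∀ t, t ∈ pvToks tail → t ∈ pvToks ('.' :: '/' :: tail)) := by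
  have h : pvToks ('.' :: '/' :: tail) = ['.'] :: pvToks tail := by
    have hd : PySem.Chars.strip ['.'] = ['.'] := by decide
    simp [pvToks, pvSplit, List.modifyHead, hd]
  rw [h]
  exact ⟨by simp [List.filter, pvGood], fun t ht => List.mem_cons_of_mem _ ht⟩

-- the A loop, under '..'-freedom, is append-of-filter over the stripped tokens
theorem pvA_loop_eq (ts parts : List String)
    (h : ".." ∉ ts.map PySem.Str.strip) :
    pvA_loop ts parts
      = parts ++ (ts.map PySem.Str.strip).filter (fun t => t ≠ "" && t ≠ ".") := by
  induction ts generalizing parts with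
  | nil => simp [pvA_loop]
  | cons token ts ih =>
      have h1 : PySem.Str.strip token ≠ ".." := by
        intro hq; exact h (by simp [hq])
      have h2 : ".." ∉ ts.map PySem.Str.strip := fun hm => h (List.mem_cons_of_mem _ hm)
      simp only [pvA_loop]
      by_cases hskip : PySem.Str.strip token = "" ∨ PySem.Str.strip token = "."
      · rw [if_pos hskip, ih _ h2]
        rcases hskip with h' | h' <;> simp [h']
      · rw [if_neg hskip, if_neg h1, ih _ h2]
        rw [not_or] at hskip
        simp [hskip.1, hskip.2]

-- string-level tokens, reduced to char level
theorem strTokens_toList (value : String) :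
    (((PySem.Str.split? value "/").getD []).map PySem.Str.strip).map String.toList
      = pvToks value.toList := by
  have h := PySem.Str.split?_map value "/"
  simp only [PySem.Str.split?, PySem.Chars.split?] at *
  simp [pvToks, ← splitOn_eq_pvSplit, List.map_map, Function.comp]

theorem filter_map_toList (ts : List String) :
    ((ts.filter (fun t => t ≠ "" && t ≠ ".")).map String.toList)
      = (ts.map String.toList).filter pvGood := by
  induction ts with
  | nil => rfl
  | cons t ts ih =>
      have h1 : (t = "") ↔ t.toList = [] := by
        rw [← String.toList_inj]; rfl
      have h2 : (t = ".") ↔ t.toList = ['.'] := by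
        rw [← String.toList_inj]; rfl
      by_cases hA : t = ""
      · subst hA
        simp only [List.map_cons, List.filter_cons]
        simp [pvGood]
        simpa using ih
      · by_cases hB : t = "."
        · subst hB
          simp only [List.map_cons, List.filter_cons]
          simp [pvGood]
          simpa using ih
        · have e1 : t.toList ≠ [] := fun h => hA (h1.mpr h)
          have e2 : t.toList ≠ ['.'] := fun h => hB (h2.mpr h)
          simp only [List.map_cons, List.filter_cons]
          simp [hA, hB, e1, e2, pvGood]
          simpa using ih

-- equal toList-images give equal joins
theorem join_eq_of_map_toList (as bs : List String)
    (h : as.map String.toList = bs.map String.toList) :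
    PySem.Str.join "/" as = PySem.Str.join "/" bs := by
  simp [PySem.Str.join, h]

-- the common normal form both ports are reduced to: split, strip tokens, filter, join
def pvPipe (value : String) : String :=
  PySem.Str.join "/"
    ((((PySem.Str.split? value "/").getD []).map PySem.Str.strip).filter (fun t => t ≠ "" && t ≠ "."))

-- ---- whitespace-stripping invariance of the stripped token list ----

theorem strip_cons_space {c : Char} (hc : PySem.Chars.isspace c = true) (h : List Char) :
    PySem.Chars.strip (c :: h) = PySem.Chars.strip h := by
  simp [PySem.Chars.strip, PySem.Chars.lstrip, hc]

theorem rstrip_append_space {c : Char} (hc : PySem.Chars.isspace c = true) (h : List Char) :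
    PySem.Chars.rstrip (h ++ [c]) = PySem.Chars.rstrip h := by
  simp [PySem.Chars.rstrip, hc]

theorem strip_append_space {c : Char} (hc : PySem.Chars.isspace c = true) (h : List Char) :
    PySem.Chars.strip (h ++ [c]) = PySem.Chars.strip h := by
  simp only [PySem.Chars.strip, PySem.Chars.lstrip, List.dropWhile_append]
  by_cases he : (List.dropWhile PySem.Chars.isspace h).isEmpty
  · rw [if_pos he]
    have : List.dropWhile PySem.Chars.isspace [c] = [] := by
      simp [hc]
    rw [this]
    have h0 : List.dropWhile PySem.Chars.isspace h = [] := by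
      simpa [List.isEmpty_iff] using he
    rw [h0]
  · rw [if_neg he]
    exact rstrip_append_space hc _

theorem isspace_ne_slash {c : Char} (hc : PySem.Chars.isspace c = true) : c ≠ '/' := by
  intro h; subst h; exact absurd hc (by decide)

-- appending one non-separator char extends the last token
def pvAppLast : List (List Char) → Char → List (List Char)
  | [], c => [[c]]
  | [x], c => [x ++ [c]]
  | x :: y :: ys, c => x :: pvAppLast (y :: ys) c

theorem pvSplit_append_char (l : List Char) {c : Char} (hc : c ≠ '/') :
    pvSplit (l ++ [c]) = pvAppLast (pvSplit l) c := by
  induction l with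
  | nil => simp [pvSplit, hc, pvAppLast, List.modifyHead]
  | cons a rest ih =>
      by_cases ha : a = '/'
      · subst ha
        simp only [List.cons_append, pvSplit, ih]
        cases h : pvSplit rest with
        | nil => exact absurd h (pvSplit_ne_nil rest)
        | cons x xs => cases xs <;> simp [pvAppLast]
      · simp only [List.cons_append, pvSplit, if_neg ha, ih]
        cases h : pvSplit rest with
        | nil => exact absurd h (pvSplit_ne_nil rest)
        | cons x xs => cases xs <;> simp [pvAppLast, List.modifyHead]

theorem map_strip_appLast {c : Char} (hc : PySem.Chars.isspace c = true) :
    ∀ ts : List (List Char), ts ≠ [] →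
      (pvAppLast ts c).map PySem.Chars.strip = ts.map PySem.Chars.strip
  | [], h => absurd rfl h
  | [x], _ => by simp [pvAppLast, strip_append_space hc]
  | x :: y :: ys, _ => by
      simp only [pvAppLast, List.map_cons]
      rw [show (pvAppLast (y :: ys) c).map PySem.Chars.strip = (y :: ys).map PySem.Chars.strip
        from map_strip_appLast hc (y :: ys) (by simp)]
      simp

theorem pvToks_append_space {c : Char} (hc : PySem.Chars.isspace c = true) (l : List Char) :
    pvToks (l ++ [c]) = pvToks l := by
  unfold pvToks
  rw [pvSplit_append_char l (isspace_ne_slash hc)]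
  exact map_strip_appLast hc _ (pvSplit_ne_nil l)

theorem pvToks_append_spaces (w : List Char) (hw : ∀ c ∈ w, PySem.Chars.isspace c = true) :
    ∀ base : List Char, pvToks (base ++ w) = pvToks base := by
  induction w with
  | nil => intro base; simp
  | cons c w' ih =>
      intro base
      have : base ++ c :: w' = (base ++ [c]) ++ w' := by simp
      rw [this, ih (fun d hd => hw d (List.mem_cons_of_mem _ hd)),
        pvToks_append_space (hw c (List.mem_cons_self ..))]

theorem pvToks_cons_space {c : Char} (hc : PySem.Chars.isspace c = true) (l : List Char) :
    pvToks (c :: l) = pvToks l := by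
  unfold pvToks
  simp only [pvSplit, if_neg (isspace_ne_slash hc)]
  cases h : pvSplit l with
  | nil => exact absurd h (pvSplit_ne_nil l)
  | cons x xs => simp [List.modifyHead, strip_cons_space hc]

theorem pvToks_lstrip (l : List Char) : pvToks (PySem.Chars.lstrip l) = pvToks l := by
  induction l with
  | nil => rfl
  | cons c rest ih =>
      by_cases hc : PySem.Chars.isspace c = true
      · rw [show PySem.Chars.lstrip (c :: rest) = PySem.Chars.lstrip rest by
          simp [PySem.Chars.lstrip, hc], ih, pvToks_cons_space hc]
      · simp only [PySem.Chars.lstrip]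
        simp [Bool.eq_false_iff.mpr hc]

theorem pvToks_rstrip (l : List Char) : pvToks (PySem.Chars.rstrip l) = pvToks l := by
  have hsplit : PySem.Chars.rstrip l ++ (List.takeWhile PySem.Chars.isspace l.reverse).reverse = l := by
    rw [PySem.Chars.rstrip, ← List.reverse_append, List.takeWhile_append_dropWhile,
      List.reverse_reverse]
  conv_rhs => rw [← hsplit]
  rw [pvToks_append_spaces _ (fun c hc => List.mem_takeWhile_imp (List.mem_reverse.mp hc))]

theorem pvToks_strip (l : List Char) : pvToks (PySem.Chars.strip l) = pvToks l := by
  rw [PySem.Chars.strip, pvToks_rstrip, pvToks_lstrip]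

-- ---- B's character scan equals filter-of-stripped-tokens ----

theorem ofList_eq_str (a : List Char) (s : String) : String.ofList a = s ↔ a = s.toList := by
  rw [← String.toList_inj, String.toList_ofList]

theorem strip_ofList (cur : List Char) :
    PySem.Str.strip (String.ofList cur) = String.ofList (PySem.Chars.strip cur) := by
  simp [PySem.Str.strip, String.toList_ofList]

theorem modifyHead_nil_append (ts : List (List Char)) :
    ts.modifyHead (fun a => ([] : List Char) ++ a) = ts := by
  cases ts <;> simp [List.modifyHead]

theorem pvB_step_slash (rest cur : List Char) (segs : List String) :
    pvB_loop ('/' :: rest) cur segs =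
      (if PySem.Str.strip (String.ofList cur) = ".." then segs
       else if PySem.Str.strip (String.ofList cur) ≠ "" ∧ PySem.Str.strip (String.ofList cur) ≠ "."
         then pvB_loop rest [] (segs ++ [PySem.Str.strip (String.ofList cur)])
         else pvB_loop rest [] segs) := by
  rw [pvB_loop, if_pos rfl]

theorem pvB_step_char {c : Char} (hc : ¬ c = '/') (rest cur : List Char) (segs : List String) :
    pvB_loop (c :: rest) cur segs = pvB_loop rest (cur ++ [c]) segs := by
  rw [pvB_loop, if_neg hc]

theorem pvB_flush_facts (cur : List Char) (hne : PySem.Chars.strip cur ≠ ['.', '.']) :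
    ¬ PySem.Str.strip (String.ofList cur) = ".." := by
  intro hq
  rw [strip_ofList, ofList_eq_str] at hq
  exact hne (by simpa using hq)

theorem pvB_flush_good (cur : List Char) (hg : pvGood (PySem.Chars.strip cur) = true) :
    PySem.Str.strip (String.ofList cur) ≠ "" ∧ PySem.Str.strip (String.ofList cur) ≠ "." := by
  constructor
  · intro hq
    rw [strip_ofList, ofList_eq_str] at hq
    rw [show (("" : String)).toList = [] from rfl] at hq
    rw [hq] at hg
    exact absurd hg (by decide)
  · intro hq
    rw [strip_ofList, ofList_eq_str] at hq
    rw [show (("." : String)).toList = ['.'] from rfl] at hq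
    rw [hq] at hg
    exact absurd hg (by decide)

theorem pvB_flush_bad (cur : List Char) (hg : ¬ pvGood (PySem.Chars.strip cur) = true) :
    ¬ (PySem.Str.strip (String.ofList cur) ≠ "" ∧ PySem.Str.strip (String.ofList cur) ≠ ".") := by
  have hcase : PySem.Chars.strip cur = [] ∨ PySem.Chars.strip cur = ['.'] := by
    by_contra hq
    rw [not_or] at hq
    exact hg (by simp [pvGood, hq.1, hq.2])
  rintro ⟨ha, hb⟩
  rcases hcase with h' | h'
  · exact ha (by rw [strip_ofList, h'])
  · exact hb (by rw [strip_ofList, h'])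

theorem pvB_loop_eq (l : List Char) : ∀ (cur : List Char) (segs : List String),
    (['.', '.'] : List Char) ∉ ((pvSplit l).modifyHead (cur ++ ·)).map PySem.Chars.strip →
    pvB_loop (l ++ ['/']) cur segs
      = segs ++ ((((pvSplit l).modifyHead (cur ++ ·)).map PySem.Chars.strip).filter pvGood).map
          String.ofList := by
  induction l with
  | nil =>
      intro cur segs h
      simp only [pvSplit, List.modifyHead, List.append_nil, List.map_cons, List.map_nil,
        List.mem_singleton] at h ⊢
      rw [List.nil_append, pvB_step_slash]
      have hne : PySem.Chars.strip cur ≠ ['.', '.'] := fun hq => h hq.symm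
      rw [if_neg (pvB_flush_facts cur hne)]
      by_cases hg : pvGood (PySem.Chars.strip cur) = true
      · rw [if_pos (pvB_flush_good cur hg)]
        simp [pvB_loop, hg, strip_ofList]
      · rw [if_neg (pvB_flush_bad cur hg)]
        simp [pvB_loop, hg]
  | cons a rest ih =>
      intro cur segs h
      by_cases ha : a = '/'
      · subst ha
        have hsp : ((pvSplit ('/' :: rest)).modifyHead (cur ++ ·)) = cur :: pvSplit rest := by
          simp [pvSplit, List.modifyHead]
        rw [hsp] at h ⊢
        simp only [List.map_cons, List.mem_cons, not_or] at h
        have hcur : PySem.Chars.strip cur ≠ ['.', '.'] := fun hq => h.1 hq.symm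
        have hrest : (['.', '.'] : List Char) ∉ (pvSplit rest).map PySem.Chars.strip := by
          intro hq
          exact h.2 (by simpa using hq)
        have hrest' : (['.', '.'] : List Char)
            ∉ ((pvSplit rest).modifyHead (fun a => ([] : List Char) ++ a)).map
                PySem.Chars.strip := by
          rw [modifyHead_nil_append]; exact hrest
        rw [List.cons_append, pvB_step_slash, if_neg (pvB_flush_facts cur hcur)]
        by_cases hg : pvGood (PySem.Chars.strip cur) = true
        · rw [if_pos (pvB_flush_good cur hg), ih [] _ hrest', modifyHead_nil_append]
          simp [hg, strip_ofList]
        · rw [if_neg (pvB_flush_bad cur hg), ih [] _ hrest', modifyHead_nil_append]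
          simp [hg]
      · have hsp : ((pvSplit (a :: rest)).modifyHead (cur ++ ·))
            = (pvSplit rest).modifyHead ((cur ++ [a]) ++ ·) := by
          simp only [pvSplit, if_neg ha]
          cases hr : pvSplit rest with
          | nil => exact absurd hr (pvSplit_ne_nil rest)
          | cons x xs => simp [List.modifyHead]
        rw [hsp] at h ⊢
        rw [List.cons_append, pvB_step_char ha]
        exact ih (cur ++ [a]) segs h

-- B's port reduced to the common normal form
theorem B_eq_pipe (raw : Option String) (hpre : Pre_normalize_rel_path_py raw) :
    normalize_rel_path_py_alt raw
      = pvPipe (PySem.Str.strip (PySem.Str.replace (raw.getD "") "\\" "/")) := by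
  unfold Pre_normalize_rel_path_py at hpre
  simp only [normalize_rel_path_py_alt, pvPipe]
  generalize PySem.Str.replace (raw.getD "") "\\" "/" = text at hpre ⊢
  have htoks : pvToks (PySem.Str.strip text).toList = pvToks text.toList := by
    rw [PySem.Str.toList_strip, pvToks_strip]
  have hno : (['.', '.'] : List Char) ∉ pvToks text.toList := by
    intro hmem
    rw [← htoks, ← strTokens_toList] at hmem
    obtain ⟨t, ht, htl⟩ := List.mem_map.mp hmem
    exact hpre (by rwa [show t = ".." from by rw [← String.toList_inj]; simpa using htl] at ht)
  have hno' : (['.', '.'] : List Char)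
      ∉ ((pvSplit text.toList).modifyHead (fun a => ([] : List Char) ++ a)).map PySem.Chars.strip := by
    rw [modifyHead_nil_append]; exact hno
  rw [pvB_loop_eq text.toList [] [] hno']
  rw [modifyHead_nil_append]
  simp only [List.nil_append]
  apply join_eq_of_map_toList
  rw [filter_map_toList, strTokens_toList, htoks]
  simp [List.map_map, Function.comp_def, String.toList_ofList, pvToks]

-- A's port reduced to the common normal form
theorem A_eq_pipe (raw : Option String) (hpre : Pre_normalize_rel_path_py raw) :
    normalize_rel_path_py raw
      = pvPipe (PySem.Str.strip (PySem.Str.replace (raw.getD "") "\\" "/")) := by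
  unfold Pre_normalize_rel_path_py at hpre
  simp only [normalize_rel_path_py, pvPipe]
  generalize hval : PySem.Str.strip (PySem.Str.replace (raw.getD "") "\\" "/") = value at hpre ⊢
  by_cases hempty : value = ""
  · subst hempty
    rw [if_pos rfl]
    decide
  · rw [if_neg hempty]
    generalize hv' : value.toList.dropWhile (· == '/') = v'
    generalize hval2 : String.ofList v' = value₂
    have hvtl2 : value₂.toList = v' := by rw [← hval2]; exact String.toList_ofList
    have hkey : ∀ w : String,
        (PySem.Str.startswith value₂ "./" = true → w.toList = v'.drop 2) →
        (PySem.Str.startswith value₂ "./" = false → w.toList = v') →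
        (pvToks w.toList).filter pvGood = (pvToks value.toList).filter pvGood ∧
        (∀ t, t ∈ pvToks w.toList → t ∈ pvToks value.toList) := by
      intro w hyes hno
      have hdw := pvToks_dropWhile value.toList
      rw [hv'] at hdw
      by_cases hpf : PySem.Str.startswith value₂ "./" = true
      · have hpre' : (['.', '/'] : List Char) <+: v' := by
          have := (PySem.Chars.startswith_iff value₂.toList ("./").toList).mp
            (by rw [← PySem.Str.startswith_eq]; exact hpf)
          simpa [hvtl2] using this
        obtain ⟨tail, htail⟩ := hpre'
        have hvds : v' = '.' :: '/' :: tail := by simpa using htail.symm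
        have hdrop : v'.drop 2 = tail := by rw [hvds]; rfl
        have hds := pvToks_dotslash tail
        constructor
        · rw [hyes hpf, hdrop, ← hdw.1, hvds, hds.1]
        · intro t ht
          rw [hyes hpf, hdrop] at ht
          exact hdw.2 t (by rw [hvds]; exact hds.2 t ht)
      · have h0 := hno (by simpa using hpf)
        exact ⟨by rw [h0]; exact hdw.1, fun t ht => hdw.2 t (by rw [h0] at ht; exact ht)⟩
    by_cases hpf : PySem.Str.startswith value₂ "./" = true
    · rw [if_pos hpf]
      have htl : (PySem.Str.slice value₂ (some 2) none).toList = v'.drop 2 := by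
        rw [PySem.Str.toList_slice, hvtl2, PySem.Chars.slice_eq_listSlice,
          PySem.List.slice_from _ (by norm_num)]
        rfl
      have hk := hkey (PySem.Str.slice value₂ (some 2) none)
        (fun _ => htl) (fun hc => by rw [hpf] at hc; cases hc)
      have hch : (['.', '.'] : List Char) ∉ pvToks value.toList := by
        intro hmem
        rw [← strTokens_toList value] at hmem
        obtain ⟨t, ht, htl2⟩ := List.mem_map.mp hmem
        exact hpre (by rwa [show t = ".." from by rw [← String.toList_inj]; simpa using htl2] at ht)
      have hnA : ".." ∉ ((PySem.Str.split? (PySem.Str.slice value₂ (some 2) none) "/").getD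
          []).map PySem.Str.strip := by
        intro hmem
        have hm2 : (".." : String).toList ∈
            ((((PySem.Str.split? (PySem.Str.slice value₂ (some 2) none) "/").getD
              []).map PySem.Str.strip).map String.toList) :=
          List.mem_map.mpr ⟨"..", hmem, rfl⟩
        rw [strTokens_toList] at hm2
        exact hch (hk.2 _ (by simpa using hm2))
      rw [pvA_loop_eq _ _ hnA]
      simp only [List.nil_append]
      apply join_eq_of_map_toList
      rw [filter_map_toList, filter_map_toList, strTokens_toList, strTokens_toList, hk.1]
    · rw [if_neg hpf]
      have hk := hkey value₂ (fun hc => by rw [hc] at hpf; cases hpf rfl) (fun _ => hvtl2)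
      have hch : (['.', '.'] : List Char) ∉ pvToks value.toList := by
        intro hmem
        rw [← strTokens_toList value] at hmem
        obtain ⟨t, ht, htl2⟩ := List.mem_map.mp hmem
        exact hpre (by rwa [show t = ".." from by rw [← String.toList_inj]; simpa using htl2] at ht)
      have hnA : ".." ∉ ((PySem.Str.split? value₂ "/").getD []).map PySem.Str.strip := by
        intro hmem
        have hm2 : (".." : String).toList ∈
            ((((PySem.Str.split? value₂ "/").getD []).map PySem.Str.strip).map String.toList) :=
          List.mem_map.mpr ⟨"..", hmem, rfl⟩
        rw [strTokens_toList] at hm2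
        exact hch (hk.2 _ (by simpa using hm2))
      rw [pvA_loop_eq _ _ hnA]
      simp only [List.nil_append]
      apply join_eq_of_map_toList
      rw [filter_map_toList, filter_map_toList, strTokens_toList, strTokens_toList, hk.1]

-- ===== VERDICT (by name: the statement is the Claim_ definition above) =====
theorem normalize_rel_path_py_spec : Claim_equal_normalize_rel_path_py := by
  intro raw _ hpre
  unfold Spec_normalize_rel_path_py
  rw [A_eq_pipe raw hpre, B_eq_pipe raw hpre]
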